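-- pv_equiv track=rewrite | github.com/hackerbotsupreme/python-coding-job | string/problem19.py | getSubStringWithEqual012
-- ===== SOURCE A (Python) =====
-- def getSubStringWithEqual012(s) :
--
-- 	arr = [];
-- 	n = len(s);
--
-- 	# generating subarrays
-- 	for i in range(n):
-- 		for j in range(i, n):
--
-- 			s1 = ""
-- 			for k in range(i, 1 + j):
-- 				s1+=s[k];
--
-- 			arr.append(s1);
--
-- 	count = 0;
--
-- 	# iterating over array of all subStrings
-- 	for i in range(len(arr)):
--
-- 		countZero=0;
-- 		countOnes=0;
-- 		countTwo=0;
-- 		curs = arr[i];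
--
-- 		for j in range(len(curs)):
--
-- 			if(curs[j] == '0'):
-- 				countZero+=1;
-- 			if(curs[j] == '1'):
-- 				countOnes+=1;
-- 			if(curs[j] == '2'):
-- 				countTwo+=1;
--
-- 		# if number of ones,two and zero are equal in a subString
-- 		if(countZero == countOnes and countOnes == countTwo):
-- 			count += 1;
--
-- 	return count;
-- ===== SOURCE B (Python) =====
-- def getSubStringWithEqual012(s):
--     # one pass: substrings with equal 0/1/2 counts <-> pairs of prefixes with
--     # equal (c0-c1, c1-c2) difference; count them with a hashmap.
--     seen = {(0, 0): 1}
--     c0 = c1 = c2 = 0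
--     count = 0
--     for ch in s:
--         if ch == '0':
--             c0 += 1
--         elif ch == '1':
--             c1 += 1
--         elif ch == '2':
--             c2 += 1
--         key = (c0 - c1, c1 - c2)
--         count += seen.get(key, 0)
--         seen[key] = seen.get(key, 0) + 1
--     return count
-- ===== Notes on version B (the rewrite author's own statement) =====
-- stated objective: faster
-- what changed: replaces the generate-all-substrings triple loop plus per-substring recount with a single pass over the string keeping a hashmap of prefix-count differences (c0-c1, c1-c2)
import Mathlib
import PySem

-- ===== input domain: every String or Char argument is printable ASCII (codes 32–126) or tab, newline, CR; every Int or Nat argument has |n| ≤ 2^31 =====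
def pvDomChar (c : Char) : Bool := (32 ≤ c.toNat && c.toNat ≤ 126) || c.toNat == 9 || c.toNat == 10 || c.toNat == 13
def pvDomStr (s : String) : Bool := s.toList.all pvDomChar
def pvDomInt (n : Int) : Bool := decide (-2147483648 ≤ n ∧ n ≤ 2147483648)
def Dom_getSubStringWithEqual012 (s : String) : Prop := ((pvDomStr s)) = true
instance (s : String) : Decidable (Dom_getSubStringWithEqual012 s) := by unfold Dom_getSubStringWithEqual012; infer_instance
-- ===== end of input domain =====

-- B replaces A's generate-all-substrings triple loop and per-substring recount by one pass
-- over the string with a hashmap of prefix-count differences (c0-c1, c1-c2); objective: faster.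

-- ===== PORT A =====
-- the per-character body of A's counting loop (three independent ifs, as in A)
def pvCharStepA (st : Int × Int × Int) (c : Char) : Int × Int × Int :=
  let st := if c = '0' then (st.1 + 1, st.2.1, st.2.2) else st
  let st := if c = '1' then (st.1, st.2.1 + 1, st.2.2) else st
  if c = '2' then (st.1, st.2.1, st.2.2 + 1) else st

def getSubStringWithEqual012 (s : String) : Int :=
  let t := s.toList
  let n : Int := t.length
  let arr : List (List Char) :=
    (PySem.List.pyRange 0 n 1).foldl (fun arr i =>
      (PySem.List.pyRange i n 1).foldl (fun arr j =>
        let s1 := (PySem.List.pyRange i (1 + j) 1).foldl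
          (fun s1 k => s1 ++ [PySem.List.pyGetD t k ' ']) []
        arr ++ [s1]) arr) []
  (PySem.List.pyRange 0 (arr.length : Int) 1).foldl (fun count i =>
    let curs := PySem.List.pyGetD arr i []
    let z := (PySem.List.pyRange 0 (curs.length : Int) 1).foldl
      (fun st j => pvCharStepA st (PySem.List.pyGetD curs j ' ')) ((0 : Int), (0 : Int), (0 : Int))
    if z.1 = z.2.1 ∧ z.2.1 = z.2.2 then count + 1 else count) 0


-- ===== PORT B =====
-- the per-character body of B's single pass (elif chain, get-with-default, insert)
def pvStepB (st : (Int × Int × Int) × PySem.Dict (Int × Int) Int × Int) (ch : Char) :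
    (Int × Int × Int) × PySem.Dict (Int × Int) Int × Int :=
  let c := st.1
  let c := if ch = '0' then (c.1 + 1, c.2.1, c.2.2)
           else if ch = '1' then (c.1, c.2.1 + 1, c.2.2)
           else if ch = '2' then (c.1, c.2.1, c.2.2 + 1) else c
  let key := (c.1 - c.2.1, c.2.1 - c.2.2)
  let cnt := st.2.2 + st.2.1.getD key 0
  let seen := st.2.1.insert key (st.2.1.getD key 0 + 1)
  (c, seen, cnt)

def getSubStringWithEqual012_alt (s : String) : Int :=
  (s.toList.foldl pvStepB
    ((0, 0, 0), PySem.Dict.ofList [(((0 : Int), (0 : Int)), (1 : Int))], 0)).2.2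


-- ===== PRECONDITION & SPEC =====
def Spec_getSubStringWithEqual012 (s : String) (out : Int) : Prop := out = getSubStringWithEqual012_alt s
instance (s : String) (out : Int) : Decidable (Spec_getSubStringWithEqual012 s out) := by unfold Spec_getSubStringWithEqual012; infer_instance

-- ===== CLAIM (what is proved, stated in full; the proofs are below) =====
def Claim_equal_getSubStringWithEqual012 : Prop := ∀ (s : String), Dom_getSubStringWithEqual012 s → Spec_getSubStringWithEqual012 s (getSubStringWithEqual012 s)

-- ===== LEMMAS AND PROOFS =====
-- Both programs count the pairs a < b of prefix lengths whose prefixes have equal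
-- (count0 - count1, count1 - count2) difference vector (pvKey); pvTail t fr is that number
-- of pairs restricted to b > fr.  A is reduced to it by flattening its substring generation
-- (pvArr, pvMapSub) and recount (pvCharFold) into a double sum and swapping the summation
-- order (pvSwap); B is reduced to it by a loop invariant on its hashmap (pvB_loop).

def pvKey (t : List Char) (a : Nat) : Int × Int :=
  (((t.take a).count '0' : Int) - ((t.take a).count '1' : Int),
   ((t.take a).count '1' : Int) - ((t.take a).count '2' : Int))

def pvTail (t : List Char) (fr : Nat) : Int :=
  ((List.range' (fr + 1) (t.length - fr)).map
    (fun b => ((List.range b).countP (fun a => pvKey t a == pvKey t b) : Int))).sum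


lemma pvCharFold (curs : List Char) : ∀ (a b c : Int),
    curs.foldl pvCharStepA (a, b, c)
      = (a + curs.count '0', b + curs.count '1', c + curs.count '2') := by
  induction curs with
  | nil => simp
  | cons x xs ih =>
    intro a b c
    simp only [List.foldl_cons, List.count_cons, ih]
    by_cases h0 : x = '0' <;> by_cases h1 : x = '1' <;> by_cases h2 : x = '2' <;>
      simp_all [pvCharStepA, Prod.ext_iff] <;> omega

lemma pvCountPRange (m : Nat) (p : Nat → Bool) :
    (((List.range m).countP p : Nat) : Int) = ∑ x ∈ Finset.range m, (if p x then (1 : Int) else 0) := by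
  induction m with
  | zero => simp
  | succ k ih =>
    rw [List.range_succ, List.countP_append, Finset.sum_range_succ, ← ih]
    by_cases hp : p k <;> simp [hp]

lemma pvQ_iff (t : List Char) (i j : Nat) (hij : i ≤ j) (_hj : j < t.length) :
    (((t.take (j + 1)).drop i).count '0' = ((t.take (j + 1)).drop i).count '1'
      ∧ ((t.take (j + 1)).drop i).count '1' = ((t.take (j + 1)).drop i).count '2')
    ↔ pvKey t i = pvKey t (j + 1) := by
  have hsplit : t.take i ++ (t.take (j + 1)).drop i = t.take (j + 1) := by
    conv_lhs => rw [show t.take i = (t.take (j+1)).take i by rw [List.take_take]; congr 1; omega]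
    exact List.take_append_drop i (t.take (j+1))
  have hc : ∀ c : Char, (t.take (j+1)).count c = (t.take i).count c + ((t.take (j+1)).drop i).count c := by
    intro c
    nth_rewrite 1 [← hsplit]
    rw [List.count_append]
  have h0 := hc '0'; have h1 := hc '1'; have h2 := hc '2'
  simp only [pvKey, Prod.ext_iff]
  omega

lemma pvSwap (n : Nat) (h : Nat → Nat → Int) :
    ∑ i ∈ Finset.range n, ∑ j ∈ Finset.Ico i n, h i j
      = ∑ j ∈ Finset.range n, ∑ i ∈ Finset.range (j + 1), h i j := by
  have e1 : ∀ i : Nat, Finset.Ico i n = (Finset.range n).filter (fun j => i ≤ j) := by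
    intro i; ext j; simp [Finset.mem_filter, Finset.mem_Ico]; omega
  calc ∑ i ∈ Finset.range n, ∑ j ∈ Finset.Ico i n, h i j
      = ∑ i ∈ Finset.range n, ∑ j ∈ Finset.range n, (if i ≤ j then h i j else 0) := by
        refine Finset.sum_congr rfl (fun i _ => ?_)
        rw [e1 i, Finset.sum_filter]
    _ = ∑ j ∈ Finset.range n, ∑ i ∈ Finset.range n, (if i ≤ j then h i j else 0) := Finset.sum_comm
    _ = ∑ j ∈ Finset.range n, ∑ i ∈ Finset.range (j + 1), h i j := by
        refine Finset.sum_congr rfl (fun j hj => ?_)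
        rw [← Finset.sum_filter]
        refine Finset.sum_congr ?_ (fun i _ => rfl)
        ext i
        simp only [Finset.mem_filter, Finset.mem_range] at *
        omega

lemma pvMapSub (t : List Char) : ∀ (d i : Nat), i + d ≤ t.length →
    (PySem.List.pyRange (i : Int) ((i + d : Nat) : Int) 1).map
      (fun k => PySem.List.pyGetD t k ' ') = (t.take (i + d)).drop i := by
  intro d
  induction d with
  | zero =>
    intro i hi
    rw [PySem.List.pyRange_one_eq_nil (by simp)]
    simp
  | succ d ih =>
    intro i hi
    have hilt : i < t.length := by omega
    rw [PySem.List.pyRange_one_cons (by push_cast; omega)]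
    have hcast : ((i + (d + 1) : Nat) : Int) = (((i + 1) + d : Nat) : Int) := by push_cast; ring
    rw [List.map_cons, hcast, show ((i : Int) + 1) = (((i+1 : Nat)) : Int) by push_cast; ring,
        ih (i+1) (by omega)]
    have hget : PySem.List.pyGetD t (i : Int) ' ' = t[i] := by
      rw [PySem.List.pyGetD_natCast, List.getD_eq_getElem _ _ hilt]
    rw [hget]
    have hlen : i < (t.take (i + (d+1))).length := by simp; omega
    rw [List.drop_eq_getElem_cons hlen, List.getElem_take]
    simp only [show i + 1 + d = i + (d+1) from by omega]

lemma pvArr (t : List Char) (L : List Nat) (acc : List (List Char)) (hL : ∀ k ∈ L, k < t.length) :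
    (List.map (fun k : Nat => (k : Int)) L).foldl (fun arr i =>
      (PySem.List.pyRange i (t.length : Int) 1).foldl (fun arr j =>
        let s1 := (PySem.List.pyRange i (1 + j) 1).foldl
          (fun s1 k => s1 ++ [PySem.List.pyGetD t k ' ']) []
        arr ++ [s1]) arr) acc
    = acc ++ L.flatMap (fun i => (List.range (t.length - i)).map
        (fun d => (t.take (i + d + 1)).drop i)) := by
  induction L generalizing acc with
  | nil => simp
  | cons k L' ih =>
    rw [List.map_cons, List.foldl_cons]
    have hk : k < t.length := hL k (by simp)
    -- inner fold over j
    have hrange : PySem.List.pyRange (k : Int) (t.length : Int) 1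
        = (List.range (t.length - k)).map (fun d => ((k + d : Nat) : Int)) := by
      rw [PySem.List.pyRange_one]
      have : ((t.length : Int) - (k : Int)).toNat = t.length - k := by omega
      rw [this]
      exact List.map_congr_left (fun d _ => by push_cast; ring)
    have hinner : ∀ (a : List (List Char)),
        (PySem.List.pyRange (k : Int) (t.length : Int) 1).foldl (fun arr j =>
          let s1 := (PySem.List.pyRange (k : Int) (1 + j) 1).foldl
            (fun s1 kk => s1 ++ [PySem.List.pyGetD t kk ' ']) []
          arr ++ [s1]) a
        = a ++ (List.range (t.length - k)).map (fun d => (t.take (k + d + 1)).drop k) := by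
      intro a
      rw [hrange, List.foldl_map, PySem.List.foldl_append_singleton_eq_map]
      congr 1
      refine List.map_congr_left (fun d hd => ?_)
      rw [List.mem_range] at hd
      rw [PySem.List.foldl_append_singleton_eq_map]
      rw [show (1 : Int) + ((k + d : Nat) : Int) = ((k + (d + 1) : Nat) : Int) by push_cast; ring]
      rw [pvMapSub t (d + 1) k (by omega)]
      simp only [List.nil_append]
      rw [show k + (d + 1) = k + d + 1 from by omega]
    rw [hinner acc, ih _ (fun x hx => hL x (List.mem_cons_of_mem _ hx))]
    simp [List.flatMap_cons]

lemma pvCountP_flatMap {α β : Type} (l : List α) (g : α → List β) (p : β → Bool) :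
    (l.flatMap g).countP p = (l.map (fun x => (g x).countP p)).sum := by
  induction l with
  | nil => simp
  | cons x xs ih => simp [List.flatMap_cons, List.countP_append, ih]

lemma pvSumRange {M : Type} [AddCommMonoid M] (n : Nat) (f : Nat → M) :
    ((List.range n).map f).sum = ∑ i ∈ Finset.range n, f i := by
  induction n with
  | zero => simp
  | succ m ih => simp [List.range_succ, Finset.sum_range_succ, ih]

lemma pvCastSum (L : List Nat) : ((L.sum : Nat) : Int) = (L.map (fun x : Nat => (x : Int))).sum := by
  induction L with
  | nil => simp
  | cons x xs ih => simp [ih]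

lemma pvB_loop : ∀ (rest p : List Char) (m : PySem.Dict (Int × Int) Int) (cnt : Int),
    (∀ k, m.getD k 0 = (((List.range (p.length + 1)).countP
        (fun a => pvKey (p ++ rest) a == k) : Nat) : Int)) →
    (rest.foldl pvStepB
        (((p.count '0' : Int), (p.count '1' : Int), (p.count '2' : Int)), m, cnt)).2.2
      = cnt + pvTail (p ++ rest) p.length := by
  intro rest
  induction rest with
  | nil =>
    intro p m cnt _
    simp [pvTail]
  | cons c r ih =>
    intro p m cnt hm
    have happ : p ++ c :: r = (p ++ [c]) ++ r := by simp
    -- the new counters are the counts of p ++ [c]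
    have hcounters :
        (if c = '0' then ((p.count '0' : Int) + 1, (p.count '1' : Int), (p.count '2' : Int))
         else if c = '1' then ((p.count '0' : Int), (p.count '1' : Int) + 1, (p.count '2' : Int))
         else if c = '2' then ((p.count '0' : Int), (p.count '1' : Int), (p.count '2' : Int) + 1)
         else ((p.count '0' : Int), (p.count '1' : Int), (p.count '2' : Int)))
        = (((p ++ [c]).count '0' : Int), ((p ++ [c]).count '1' : Int), ((p ++ [c]).count '2' : Int)) := by
      by_cases h0 : c = '0'
      · subst h0
        simp [List.count_append]
      by_cases h1 : c = '1'
      · subst h1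
        simp [List.count_append, h0]
      by_cases h2 : c = '2'
      · subst h2
        simp [List.count_append, h0, h1]
      · simp [List.count_append, h0, h1, h2]
    -- take of the full string at p.length + 1 is p ++ [c]
    have htake : (p ++ c :: r).take (p.length + 1) = p ++ [c] := by
      rw [show p.length + 1 = p.length + [c].length by simp, happ]
      rw [List.take_append]
      simp
    have hkey : (((p ++ [c]).count '0' : Int) - ((p ++ [c]).count '1' : Int),
                 ((p ++ [c]).count '1' : Int) - ((p ++ [c]).count '2' : Int))
        = pvKey (p ++ c :: r) (p.length + 1) := by
      rw [pvKey, htake]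
    -- one step of the fold
    rw [List.foldl_cons]
    have hstep : pvStepB (((p.count '0' : Int), (p.count '1' : Int), (p.count '2' : Int)), m, cnt) c
        = ((((p ++ [c]).count '0' : Int), ((p ++ [c]).count '1' : Int), ((p ++ [c]).count '2' : Int)),
           m.insert (pvKey (p ++ c :: r) (p.length + 1))
             (m.getD (pvKey (p ++ c :: r) (p.length + 1)) 0 + 1),
           cnt + m.getD (pvKey (p ++ c :: r) (p.length + 1)) 0) := by
      simp only [pvStepB, hcounters, hkey]
    rw [hstep]
    -- new invariant for p' = p ++ [c]
    have hm' : ∀ k, (m.insert (pvKey (p ++ c :: r) (p.length + 1))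
             (m.getD (pvKey (p ++ c :: r) (p.length + 1)) 0 + 1)).getD k 0
        = ((((List.range ((p ++ [c]).length + 1)).countP
            (fun a => pvKey ((p ++ [c]) ++ r) a == k)) : Nat) : Int) := by
      intro k
      rw [PySem.Dict.getD_insert]
      rw [show (p ++ [c]).length + 1 = (p.length + 1) + 1 by simp, List.range_succ,
          List.countP_append, ← happ]
      have hsingle : ([p.length + 1].countP (fun a => pvKey (p ++ c :: r) a == k))
          = if pvKey (p ++ c :: r) (p.length + 1) = k then 1 else 0 := by
        simp [List.countP_cons]
      rw [hsingle]
      by_cases hk : k = pvKey (p ++ c :: r) (p.length + 1)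
      · subst hk
        rw [if_pos rfl, if_pos rfl, hm]
        push_cast
        ring
      · rw [if_neg hk, if_neg (fun h => hk h.symm), hm k]
        push_cast
        ring
    have := ih (p ++ [c])
      (m.insert (pvKey (p ++ c :: r) (p.length + 1))
        (m.getD (pvKey (p ++ c :: r) (p.length + 1)) 0 + 1))
      (cnt + m.getD (pvKey (p ++ c :: r) (p.length + 1)) 0) hm'
    rw [this, ← happ, hm (pvKey (p ++ c :: r) (p.length + 1))]
    -- arithmetic: peel the first element of pvTail t p.length
    have hlen : (p ++ c :: r).length - p.length = ((p ++ c :: r).length - (p.length + 1)) + 1 := by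
      simp
      omega
    rw [pvTail, pvTail, show (p ++ [c]).length = p.length + 1 by simp, hlen, List.range'_succ,
        List.map_cons, List.sum_cons]
    ring

lemma pvA_eq (s : String) : getSubStringWithEqual012 s = pvTail s.toList 0 := by
  simp only [getSubStringWithEqual012]
  rw [PySem.List.pyRange_zero_nat s.toList.length,
      pvArr s.toList (List.range s.toList.length) [] (by simp), List.nil_append]
  set t := s.toList with ht
  set arrv : List (List Char) := (List.range t.length).flatMap
    (fun i => (List.range (t.length - i)).map (fun d => (t.take (i + d + 1)).drop i)) with harr
  rw [PySem.List.foldl_pyRange_zero_pyGetD' arrv []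
      (fun count curs =>
        let z := (PySem.List.pyRange 0 (curs.length : Int)).foldl
          (fun st j => pvCharStepA st (PySem.List.pyGetD curs j ' ')) ((0 : Int), (0 : Int), (0 : Int))
        if z.1 = z.2.1 ∧ z.2.1 = z.2.2 then count + 1 else count) 0]
  have hfun : (fun (count : Int) (curs : List Char) =>
        let z := (PySem.List.pyRange 0 (curs.length : Int)).foldl
          (fun st j => pvCharStepA st (PySem.List.pyGetD curs j ' ')) ((0 : Int), (0 : Int), (0 : Int))
        if z.1 = z.2.1 ∧ z.2.1 = z.2.2 then count + 1 else count)
      = (fun (count : Int) (curs : List Char) =>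
        if curs.count '0' = curs.count '1' ∧ curs.count '1' = curs.count '2'
        then count + 1 else count) := by
    funext count curs
    rw [PySem.List.foldl_pyRange_zero_pyGetD' curs ' ' pvCharStepA ((0 : Int), (0 : Int), (0 : Int))]
    rw [pvCharFold]
    simp
  rw [hfun, PySem.List.foldl_ite_add_one
      (fun curs : List Char => curs.count '0' = curs.count '1' ∧ curs.count '1' = curs.count '2') arrv 0,
      zero_add, harr, pvCountP_flatMap]
  -- countP over the inner maps, rewritten through pvQ_iff
  have hstep2 : (List.map (fun x => List.countP
        (fun curs => decide (curs.count '0' = curs.count '1' ∧ curs.count '1' = curs.count '2'))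
        ((List.range (t.length - x)).map (fun d => (t.take (x + d + 1)).drop x)))
      (List.range t.length))
      = List.map (fun i => List.countP
          (fun d => pvKey t i == pvKey t (i + d + 1)) (List.range (t.length - i)))
        (List.range t.length) := by
    refine List.map_congr_left (fun i hi => ?_)
    rw [List.mem_range] at hi
    rw [List.countP_map]
    refine List.countP_congr (fun d hd => ?_)
    rw [List.mem_range] at hd
    simp only [Function.comp_apply, decide_eq_true_eq, beq_iff_eq]
    exact pvQ_iff t i (i + d) (by omega) (by omega)
  rw [hstep2, pvCastSum, List.map_map]
  -- move to Finset sums, swap, and come back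
  have lhs_eq : ((List.range t.length).map
        ((fun x : Nat => (x : Int)) ∘ (fun i => List.countP
          (fun d => pvKey t i == pvKey t (i + d + 1)) (List.range (t.length - i))))).sum
      = ∑ j ∈ Finset.range t.length,
          ((List.countP (fun a => pvKey t a == pvKey t (j + 1)) (List.range (j + 1)) : Nat) : Int) := by
    rw [pvSumRange]
    have h1 : ∀ i ∈ Finset.range t.length,
        ((fun x : Nat => (x : Int)) ∘ (fun i => List.countP
          (fun d => pvKey t i == pvKey t (i + d + 1)) (List.range (t.length - i)))) i
        = ∑ j ∈ Finset.Ico i t.length, (if pvKey t i == pvKey t (j + 1) then (1 : Int) else 0) := by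
      intro i _
      simp only [Function.comp_apply]
      rw [pvCountPRange, Finset.sum_Ico_eq_sum_range (fun j => if pvKey t i == pvKey t (j + 1) then (1 : Int) else 0) i t.length]
    rw [Finset.sum_congr rfl h1, pvSwap t.length (fun i j => if pvKey t i == pvKey t (j + 1) then (1 : Int) else 0)]
    refine Finset.sum_congr rfl (fun j _ => ?_)
    rw [pvCountPRange (j + 1) (fun a => pvKey t a == pvKey t (j + 1))]
  rw [lhs_eq]
  -- and the right-hand side is the same Finset sum
  rw [pvTail]
  rw [show t.length - 0 = t.length from rfl, List.range'_eq_map_range, List.map_map, pvSumRange]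
  refine (Finset.sum_congr rfl (fun j _ => ?_)).symm
  simp [Nat.add_comm]

lemma pvB_eq (s : String) : getSubStringWithEqual012_alt s = pvTail s.toList 0 := by
  simp only [getSubStringWithEqual012_alt]
  have hinv : ∀ k, (PySem.Dict.ofList [(((0 : Int), (0 : Int)), (1 : Int))]).getD k 0
      = (((List.range (([] : List Char).length + 1)).countP
          (fun a => pvKey (([] : List Char) ++ s.toList) a == k) : Nat) : Int) := by
    intro k
    have hk0 : pvKey s.toList 0 = ((0 : Int), (0 : Int)) := by simp [pvKey]
    by_cases hk : k = ((0 : Int), (0 : Int))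
    · subst hk
      simp [PySem.Dict.ofList, PySem.Dict.update, hk0]
    · simp [PySem.Dict.ofList, PySem.Dict.update, PySem.Dict.getD_insert, hk0, hk, Ne.symm hk]
  have h := pvB_loop s.toList [] (PySem.Dict.ofList [(((0 : Int), (0 : Int)), (1 : Int))]) 0 hinv
  simpa using h

-- ===== VERDICT (by name: the statement is the Claim_ definition above) =====
theorem getSubStringWithEqual012_spec : Claim_equal_getSubStringWithEqual012 := by
  intro s _
  unfold Spec_getSubStringWithEqual012
  rw [pvA_eq, pvB_eq]
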